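-- pv_equiv track=rewrite | github.com/pozilei6/extensions-final | colors.py | parse_S2
-- ===== SOURCE A (Python) =====
-- def parse_S2(row):
--     black_S2 = [1, 1, 1, 1]
--     green_S2 = [1, 1, 1, 1, 1]
--     red_S2 = [1, 1, 1, 1, 1]
--     for index, value in enumerate(row):
--         if value != "":
--             if index % 3 == 0:
--                 red_S2[index // 3] = 0
--             elif index % 3 == 1:
--                 green_S2[index // 3] = 0
--             elif index % 3 == 2:
--                 black_S2[index // 3] = 0
--     return [red_S2, green_S2, black_S2]
-- ===== SOURCE B (Python) =====
-- def parse_S2(row):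
--     filled = set()
--     for index, value in enumerate(row):
--         if value != "":
--             filled.add(index)
--     red_S2 = [0 if 3 * j in filled else 1 for j in range(5)]
--     green_S2 = [0 if 3 * j + 1 in filled else 1 for j in range(5)]
--     black_S2 = [0 if 3 * j + 2 in filled else 1 for j in range(4)]
--     return [red_S2, green_S2, black_S2]
-- ===== Notes on version B (the rewrite author's own statement) =====
-- stated objective: alternative
-- what changed: B builds the set of nonempty indices in one pass and then constructs each channel list by a membership test (0 if 3*j+c in the set else 1), instead of A's per-index modulo dispatch with in-place updates of preallocated lists.
import Mathlib
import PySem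

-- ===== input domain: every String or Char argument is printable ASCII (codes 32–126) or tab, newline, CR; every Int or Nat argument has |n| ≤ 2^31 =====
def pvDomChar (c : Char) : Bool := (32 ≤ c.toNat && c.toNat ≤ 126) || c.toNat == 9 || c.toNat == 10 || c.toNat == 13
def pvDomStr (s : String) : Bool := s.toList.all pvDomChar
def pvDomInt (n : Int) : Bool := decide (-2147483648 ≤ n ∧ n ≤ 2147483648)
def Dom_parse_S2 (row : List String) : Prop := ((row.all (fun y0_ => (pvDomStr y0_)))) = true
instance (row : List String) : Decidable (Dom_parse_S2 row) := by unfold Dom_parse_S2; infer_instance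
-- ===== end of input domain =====

-- B builds the set of nonempty indices once and reads each channel cell off by membership,
-- replacing A's per-index modulo dispatch and in-place updates (objective: alternative).

-- ===== PORT A =====
-- state is (red_S2, green_S2, black_S2); Python's red_S2[index // 3] = 0 becomes List.set
-- (in range on every input admitted by Pre_parse_S2; out of range Python raises IndexError).
def pvStepA (s : List Int × List Int × List Int) (iv : Int × String) :
    List Int × List Int × List Int :=
  if iv.2 ≠ "" then
    if PySem.Int.mod iv.1 3 == 0 then
      (s.1.set (PySem.Int.floordiv iv.1 3).toNat 0, s.2.1, s.2.2)
    else if PySem.Int.mod iv.1 3 == 1 then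
      (s.1, s.2.1.set (PySem.Int.floordiv iv.1 3).toNat 0, s.2.2)
    else if PySem.Int.mod iv.1 3 == 2 then
      (s.1, s.2.1, s.2.2.set (PySem.Int.floordiv iv.1 3).toNat 0)
    else s
  else s

def parse_S2 (row : List String) : List (List Int) :=
  let s := (PySem.List.enumerate row 0).foldl pvStepA ([1, 1, 1, 1, 1], [1, 1, 1, 1, 1], [1, 1, 1, 1])
  [s.1, s.2.1, s.2.2]

-- ===== PORT B =====
def pvFilled (row : List String) : PySem.Set Int :=
  (PySem.List.enumerate row 0).foldl
    (fun s iv => if iv.2 ≠ "" then PySem.Set.add s iv.1 else s) PySem.Set.empty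

def parse_S2_alt (row : List String) : List (List Int) :=
  let filled := pvFilled row
  [ (PySem.List.pyRange 0 5 1).map (fun j => if PySem.Set.contains filled (3 * j) then 0 else 1),
    (PySem.List.pyRange 0 5 1).map (fun j => if PySem.Set.contains filled (3 * j + 1) then 0 else 1),
    (PySem.List.pyRange 0 4 1).map (fun j => if PySem.Set.contains filled (3 * j + 2) then 0 else 1) ]

-- ===== PRECONDITION & SPEC =====
-- Pre_ excludes exactly the inputs where Python A raises IndexError: a nonempty entry at an
-- index whose channel slot lies past the fixed channel list (red/green: slot ≥ 5, black: slot ≥ 4).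
def Pre_parse_S2 (row : List String) : Prop :=
  ∀ p ∈ PySem.List.enumerate row 0, p.2 ≠ "" →
    (PySem.Int.mod p.1 3 = 0 → p.1 < 15) ∧
    (PySem.Int.mod p.1 3 = 1 → p.1 < 16) ∧
    (PySem.Int.mod p.1 3 = 2 → p.1 < 14)
instance (row : List String) : Decidable (Pre_parse_S2 row) := by unfold Pre_parse_S2; infer_instance

def pvWitness_parse_S2 : List String := ["a", "", "b", "c"]

def Spec_parse_S2 (row : List String) (out : List (List Int)) : Prop := out = parse_S2_alt row
instance (row : List String) (out : List (List Int)) : Decidable (Spec_parse_S2 row out) := by unfold Spec_parse_S2; infer_instance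

-- ===== CLAIM (what is proved, stated in full; the proofs are below) =====
def Claim_equal_parse_S2 : Prop := ∀ (row : List String), Dom_parse_S2 row → Pre_parse_S2 row → Spec_parse_S2 row (parse_S2 row)

-- ===== LEMMAS AND PROOFS =====

-- per-channel step functions A's combined step factors into
def pvChanStep (r3 : Int) (r : List Int) (p : Int × String) : List Int :=
  if p.2 ≠ "" ∧ PySem.Int.mod p.1 3 = r3 then r.set (PySem.Int.floordiv p.1 3).toNat 0 else r

lemma stepA_eq_chan (s : List Int × List Int × List Int) (p : Int × String) :
    pvStepA s p = (pvChanStep 0 s.1 p, pvChanStep 1 s.2.1 p, pvChanStep 2 s.2.2 p) := by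
  rcases s with ⟨r, g, b⟩
  unfold pvStepA pvChanStep
  by_cases h : p.2 = ""
  · simp [h]
  · have h3 : 0 < (3 : Int) := by norm_num
    have hlt := PySem.Int.mod_lt p.1 h3
    have hge := PySem.Int.mod_nonneg p.1 h3
    have hc : PySem.Int.mod p.1 3 = 0 ∨ PySem.Int.mod p.1 3 = 1 ∨ PySem.Int.mod p.1 3 = 2 := by
      omega
    rcases hc with hm | hm | hm <;>
      rw [PySem.Int.mod_eq_emod_of_pos h3] at hm <;>
      simp [h, hm, Int.dvd_iff_emod_eq_zero]

lemma foldl_stepA_split (l : List (Int × String)) (r g b : List Int) :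
    l.foldl pvStepA (r, g, b) =
      (l.foldl (pvChanStep 0) r, l.foldl (pvChanStep 1) g, l.foldl (pvChanStep 2) b) := by
  induction l generalizing r g b with
  | nil => rfl
  | cons p l ih => simp [List.foldl_cons, stepA_eq_chan, ih]

lemma length_chanStep (r3 : Int) (r : List Int) (p : Int × String) :
    (pvChanStep r3 r p).length = r.length := by
  unfold pvChanStep; split <;> simp

lemma length_foldl_chan (r3 : Int) (l : List (Int × String)) (r : List Int) :
    (l.foldl (pvChanStep r3) r).length = r.length := by
  induction l generalizing r with
  | nil => rfl
  | cons p l ih => simp [List.foldl_cons, ih, length_chanStep]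

lemma getElem?_foldl_chan (r3 : Int) (l : List (Int × String)) (r : List Int) (j : Nat)
    (hj : j < r.length) :
    (l.foldl (pvChanStep r3) r)[j]? =
      if ∃ p ∈ l, p.2 ≠ "" ∧ PySem.Int.mod p.1 3 = r3 ∧ (PySem.Int.floordiv p.1 3).toNat = j
      then some 0 else r[j]? := by
  induction l generalizing r with
  | nil => simp
  | cons p l ih =>
    rw [List.foldl_cons, ih _ (by rw [length_chanStep]; exact hj)]
    by_cases hl : ∃ q ∈ l, q.2 ≠ "" ∧ PySem.Int.mod q.1 3 = r3 ∧ (PySem.Int.floordiv q.1 3).toNat = j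
    · rw [if_pos hl, if_pos]
      obtain ⟨q, hq, hc⟩ := hl
      exact ⟨q, List.mem_cons_of_mem _ hq, hc⟩
    · rw [if_neg hl]
      unfold pvChanStep
      by_cases hp : p.2 ≠ "" ∧ PySem.Int.mod p.1 3 = r3
      · rw [if_pos hp]
        by_cases hidx : (PySem.Int.floordiv p.1 3).toNat = j
        · rw [if_pos ⟨p, List.mem_cons_self, hp.1, hp.2, hidx⟩, hidx,
            List.getElem?_set_self (by exact hj)]
        · rw [List.getElem?_set_ne hidx, if_neg]
          rintro ⟨q, hq, hc⟩
          rcases List.mem_cons.1 hq with rfl | hq'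
          · exact hidx hc.2.2
          · exact hl ⟨q, hq', hc⟩
      · rw [if_neg hp, if_neg]
        rintro ⟨q, hq, hc⟩
        rcases List.mem_cons.1 hq with rfl | hq'
        · exact hp ⟨hc.1, hc.2.1⟩
        · exact hl ⟨q, hq', hc⟩

lemma mem_pvFilled_aux (l : List (Int × String)) (s : PySem.Set Int) (x : Int) :
    x ∈ l.foldl (fun s iv => if iv.2 ≠ "" then PySem.Set.add s iv.1 else s) s ↔
      x ∈ s ∨ ∃ p ∈ l, p.2 ≠ "" ∧ p.1 = x := by
  induction l generalizing s with
  | nil => simp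
  | cons p l ih =>
    rw [List.foldl_cons, ih]
    by_cases hp : p.2 = ""
    · simp [hp]
    · simp [hp, PySem.Set.mem_add]; tauto

lemma mem_pvFilled (row : List String) (x : Int) :
    x ∈ pvFilled row ↔ ∃ p ∈ PySem.List.enumerate row 0, p.2 ≠ "" ∧ p.1 = x := by
  rw [pvFilled, mem_pvFilled_aux]
  simp [PySem.Set.empty]

-- for a nonnegative enumerate index, "mod 3 = r3 and floordiv 3 = j" is "index = 3j + r3"
lemma idx_char (i : Int) (hi : 0 ≤ i) (r3 : Int) (j : Nat) (hr : 0 ≤ r3) (hr3 : r3 < 3) :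
    (PySem.Int.mod i 3 = r3 ∧ (PySem.Int.floordiv i 3).toNat = j) ↔ i = 3 * (j : Int) + r3 := by
  have h3 : (0 : Int) < 3 := by norm_num
  rw [PySem.Int.mod_eq_emod_of_pos h3, PySem.Int.floordiv_eq_ediv_of_pos h3]
  constructor
  · rintro ⟨hm, hd⟩
    have hnn : 0 ≤ i / 3 := Int.ediv_nonneg hi (by norm_num)
    have hd' : i / 3 = (j : Int) := by omega
    omega
  · rintro rfl
    constructor
    · omega
    · have : (3 * (j : Int) + r3) / 3 = (j : Int) := by omega
      rw [this]; exact Int.toNat_natCast j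

lemma chan_cell (row : List String) (r3 : Int) (hr : 0 ≤ r3) (hr3 : r3 < 3)
    (init : List Int) (j : Nat) (hj : j < init.length) :
    ((PySem.List.enumerate row 0).foldl (pvChanStep r3) init)[j]? =
      if PySem.Set.contains (pvFilled row) (3 * (j : Int) + r3) then some 0 else init[j]? := by
  rw [getElem?_foldl_chan _ _ _ _ hj]
  have : PySem.Set.contains (pvFilled row) (3 * (j : Int) + r3) = true ↔
      ∃ p ∈ PySem.List.enumerate row 0, p.2 ≠ "" ∧ p.1 = 3 * (j : Int) + r3 := by
    rw [PySem.Set.contains_iff _ _, mem_pvFilled]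
  by_cases hmem : PySem.Set.contains (pvFilled row) (3 * (j : Int) + r3) = true
  · rw [if_pos hmem, if_pos]
    obtain ⟨p, hp, hne, hpx⟩ := this.1 hmem
    obtain ⟨k, hk, rfl⟩ := (PySem.List.mem_enumerate_iff _ _ _).1 hp
    refine ⟨_, hp, hne, ?_⟩
    have hnn : (0 : Int) ≤ 0 + (k : Int) := by positivity
    exact (idx_char _ hnn r3 j hr hr3).2 hpx
  · rw [if_neg hmem, if_neg]
    rintro ⟨p, hp, hne, hm, hd⟩
    obtain ⟨k, hk, rfl⟩ := (PySem.List.mem_enumerate_iff _ _ _).1 hp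
    have hnn : (0 : Int) ≤ 0 + (k : Int) := by positivity
    exact hmem (this.2 ⟨_, hp, hne, (idx_char _ hnn r3 j hr hr3).1 ⟨hm, hd⟩⟩)

lemma chan_list (row : List String) (r3 : Int) (hr : 0 ≤ r3) (hr3 : r3 < 3)
    (init : List Int) (n : Nat) (hlen : init.length = n) (hone : ∀ x ∈ init, x = (1 : Int)) :
    (PySem.List.enumerate row 0).foldl (pvChanStep r3) init =
      (PySem.List.pyRange 0 n 1).map
        (fun j => if PySem.Set.contains (pvFilled row) (3 * j + r3) then 0 else 1) := by
  apply List.ext_getElem?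
  intro j
  by_cases hj : j < n
  · rw [chan_cell row r3 hr hr3 init j (by omega)]
    have hr2 : ((PySem.List.pyRange 0 n 1).map
        (fun j => if PySem.Set.contains (pvFilled row) (3 * j + r3) then (0:Int) else 1))[j]? =
        some (if PySem.Set.contains (pvFilled row) (3 * (j:Int) + r3) then 0 else 1) := by
      rw [PySem.List.getElem?_map_pyRange_zero _ _ _ hj]
    rw [hr2]
    have hinit : init[j]? = some 1 := by
      rw [List.getElem?_eq_getElem (by omega)]
      exact congrArg some (hone _ (List.getElem_mem _))
    split <;> simp [hinit]
  · rw [List.getElem?_eq_none, List.getElem?_eq_none]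
    · simp [PySem.List.length_pyRange_one]; omega
    · rw [length_foldl_chan]; omega

-- ===== VERDICT (by name: the statement is the Claim_ definition above) =====
theorem parse_S2_spec : Claim_equal_parse_S2 := by
  intro row _ _
  show parse_S2 row = parse_S2_alt row
  unfold parse_S2 parse_S2_alt
  rw [foldl_stepA_split]
  simp only
  rw [chan_list row 0 (by norm_num) (by norm_num) _ 5 rfl (by decide),
      chan_list row 1 (by norm_num) (by norm_num) _ 5 rfl (by decide),
      chan_list row 2 (by norm_num) (by norm_num) _ 4 rfl (by decide)]
  norm_num
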